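-- pv_equiv track=rewrite | github.com/shaquilledavid/IEEE | ieee.py | scientific
-- ===== SOURCE A (Python) =====
-- def scientific(binarynum):
--     """Change a binary number to its scientific notation equivalent
--
--     >>> scientific('100000111.01001100110011001100')
--     '1.0000011101001100110011001100e8'
--     """
--
--     bits = []
--     for i in binarynum:
--         bits.append(i)
--
--     if bits[0] == '-':
--         x = bits[1:]
--         if '.' in bits:
--             exponent = x.index(".") - 1
--             x.remove(".")
--             rest = ''.join(x[1:])
--         elif '.' not in bits:
--             exponent = len(x) - 1
--             rest = ''.join(x[1:])
--
--         return x[0] + '.' + rest + 'e' + str(exponent)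
--
--     else:
--         if '.' in bits:
--             exponent = bits.index(".") - 1 #DOUBLE CHECK THIS
--             bits.remove(".")
--             rest = ''.join(bits[1:])
--         elif '.' not in bits:
--             exponent = len(bits) - 1
--             rest = ''.join(bits[1:])
--
--         return bits[0] + '.' + rest + 'e' + str(exponent)
-- ===== SOURCE B (Python) =====
-- def scientific(binarynum):
--     start = 1 if binarynum[:1] == '-' else 0
--     digits = []
--     exp = None
--     for ch in binarynum[start:]:
--         if ch == '.' and exp is None:
--             exp = len(digits) - 1
--         else:
--             digits.append(ch)
--     if exp is None:
--         exp = len(digits) - 1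
--     return digits[0] + '.' + ''.join(digits[1:]) + 'e' + str(exp)
-- ===== Notes on version B (the rewrite author's own statement) =====
-- stated objective: alternative
-- what changed: Replaces A's build-a-char-list then locate/remove the dot with .index/.remove and four sign/dot branches by a single left-to-right pass with an accumulator: one loop collects digits and records the exponent the moment the first '.' is seen, with no search, no removal and no branch duplication.
-- outside the precondition, e.g. on scientific(''): A raises IndexError, B raises IndexError; on scientific('-'): A raises IndexError, B raises IndexError; on scientific('.'): A raises IndexError, B raises IndexError
import Mathlib
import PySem

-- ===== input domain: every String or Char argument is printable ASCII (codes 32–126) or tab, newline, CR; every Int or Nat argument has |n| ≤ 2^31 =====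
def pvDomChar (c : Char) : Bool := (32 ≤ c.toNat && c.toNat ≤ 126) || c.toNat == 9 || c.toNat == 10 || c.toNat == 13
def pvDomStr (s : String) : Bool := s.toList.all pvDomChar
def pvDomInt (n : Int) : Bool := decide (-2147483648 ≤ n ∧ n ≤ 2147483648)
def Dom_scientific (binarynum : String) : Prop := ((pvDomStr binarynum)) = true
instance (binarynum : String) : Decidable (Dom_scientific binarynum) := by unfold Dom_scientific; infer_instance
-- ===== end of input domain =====

-- B replaces A's build-a-list then locate/remove-the-dot (.index/.remove, four sign/dot branches)
-- by one accumulator pass: collect digits and record the exponent when the first '.' appears (alternative).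

-- ===== PORT A =====
def scientific (binarynum : String) : String :=
  -- bits = []; for i in binarynum: bits.append(i)
  let bits := binarynum.toList.foldl (fun acc i => acc ++ [i]) []
  if PySem.List.pyGet? bits 0 = some '-' then      -- bits[0] == '-'  (bits[0] raises on ''; excluded by Pre_)
    let x := PySem.List.slice bits (some 1) none   -- x = bits[1:]
    if '.' ∈ bits then                             -- '.' in bits
      -- exponent = x.index(".") - 1; x.remove("."); rest = ''.join(x[1:])
      let exponent : Int := (((PySem.List.index? x '.').getD 0 : Nat) : Int) - 1
      let x2 := (PySem.List.remove? x '.').getD x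
      let rest := PySem.Chars.join [] ((PySem.List.slice x2 (some 1) none).map (fun c => [c]))
      String.ofList ((PySem.List.pyGet? x2 0).getD ' ' :: '.' :: rest ++ 'e' :: PySem.Int.toChars exponent)
    else
      -- exponent = len(x) - 1; rest = ''.join(x[1:])
      let exponent : Int := (x.length : Int) - 1
      let rest := PySem.Chars.join [] ((PySem.List.slice x (some 1) none).map (fun c => [c]))
      String.ofList ((PySem.List.pyGet? x 0).getD ' ' :: '.' :: rest ++ 'e' :: PySem.Int.toChars exponent)
  else
    if '.' ∈ bits then
      let exponent : Int := (((PySem.List.index? bits '.').getD 0 : Nat) : Int) - 1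
      let bits2 := (PySem.List.remove? bits '.').getD bits
      let rest := PySem.Chars.join [] ((PySem.List.slice bits2 (some 1) none).map (fun c => [c]))
      String.ofList ((PySem.List.pyGet? bits2 0).getD ' ' :: '.' :: rest ++ 'e' :: PySem.Int.toChars exponent)
    else
      let exponent : Int := (bits.length : Int) - 1
      let rest := PySem.Chars.join [] ((PySem.List.slice bits (some 1) none).map (fun c => [c]))
      String.ofList ((PySem.List.pyGet? bits 0).getD ' ' :: '.' :: rest ++ 'e' :: PySem.Int.toChars exponent)

-- ===== PORT B =====
-- one step of B's loop body: 'if ch == "." and exp is None: exp = len(digits)-1 else: digits.append(ch)'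
def scientificStep (st : List Char × Option Int) (ch : Char) : List Char × Option Int :=
  if ch = '.' ∧ st.2 = none then (st.1, some ((st.1.length : Int) - 1))
  else (st.1 ++ [ch], st.2)

def scientific_alt (binarynum : String) : String :=
  let l := binarynum.toList
  -- start = 1 if binarynum[:1] == '-' else 0
  let start : Int := if PySem.List.slice l none (some 1) = ['-'] then 1 else 0
  -- for ch in binarynum[start:]: …   (digits = [], exp = None)
  let st := (PySem.List.slice l (some start) none).foldl scientificStep ([], none)
  -- if exp is None: exp = len(digits) - 1
  let exp := st.2.getD ((st.1.length : Int) - 1)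
  -- return digits[0] + '.' + ''.join(digits[1:]) + 'e' + str(exp)   (digits[0] raises iff digits == []; excluded by Pre_)
  String.ofList ((PySem.List.pyGet? st.1 0).getD ' ' :: '.' ::
    PySem.Chars.join [] ((PySem.List.slice st.1 (some 1) none).map (fun c => [c]))
    ++ 'e' :: PySem.Int.toChars exp)

-- ===== PRECONDITION & SPEC =====
-- Pre_ excludes exactly the four strings '', '-', '.', '-.' (sign stripped, the string is empty or a
-- lone dot): there A raises IndexError on bits[0]/x[0] (and B raises IndexError on digits[0] too).
def Pre_scientific (binarynum : String) : Prop :=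
  (if binarynum.toList.head? = some '-' then binarynum.toList.tail else binarynum.toList) ≠ [] ∧
  (if binarynum.toList.head? = some '-' then binarynum.toList.tail else binarynum.toList) ≠ ['.']
instance (binarynum : String) : Decidable (Pre_scientific binarynum) := by unfold Pre_scientific; infer_instance
def pvWitness_scientific : String := "100000111.01001100110011001100"

def Spec_scientific (binarynum : String) (out : String) : Prop := out = scientific_alt binarynum
instance (binarynum : String) (out : String) : Decidable (Spec_scientific binarynum out) := by unfold Spec_scientific; infer_instance

-- ===== CLAIM (what is proved, stated in full; the proofs are below) =====
def Claim_equal_scientific : Prop := ∀ (binarynum : String), Dom_scientific binarynum → Pre_scientific binarynum → Spec_scientific binarynum (scientific binarynum)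

-- ===== LEMMAS AND PROOFS =====

-- once exp is set the loop only appends
lemma fold_some (s d : List Char) (e : Int) :
    s.foldl scientificStep (d, some e) = (d ++ s, some e) := by
  induction s generalizing d with
  | nil => simp
  | cons c t ih => simp [List.foldl_cons, scientificStep, ih]

-- no dot: the loop appends everything, exp stays None
lemma fold_nodot (s d : List Char) (h : '.' ∉ s) :
    s.foldl scientificStep (d, none) = (d ++ s, none) := by
  induction s generalizing d with
  | nil => simp
  | cons c t ih =>
    have hc : ¬ c = '.' := fun h' => h (h' ▸ List.mem_cons_self ..)
    rw [List.foldl_cons,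
      show scientificStep (d, none) c = (d ++ [c], none) from by simp [scientificStep, hc],
      ih (d ++ [c]) (fun hm => h (List.mem_cons_of_mem _ hm))]
    simp

-- a first dot: digits = pre ++ suf, exp = len(pre) - 1
lemma fold_dot (pre suf : List Char) (h : '.' ∉ pre) :
    (pre ++ '.' :: suf).foldl scientificStep ([], none)
      = (pre ++ suf, some ((pre.length : Int) - 1)) := by
  rw [List.foldl_append, fold_nodot pre [] h]
  rw [List.nil_append, List.foldl_cons,
    show scientificStep (pre, none) '.' = (pre, some ((pre.length : Int) - 1)) from by
      simp [scientificStep]]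
  exact fold_some suf pre _

-- the shared core: A's inner ('.' present / absent) computation on a sign-stripped list x
-- equals B's single-pass computation on the same x
lemma core (x : List Char) :
    (if '.' ∈ x then
        String.ofList ((PySem.List.pyGet? ((PySem.List.remove? x '.').getD x) 0).getD ' ' :: '.' ::
          PySem.Chars.join [] ((((PySem.List.remove? x '.').getD x).tail).map (fun c => [c]))
          ++ 'e' :: PySem.Int.toChars ((((PySem.List.index? x '.').getD 0 : Nat) : Int) - 1))
      else
        String.ofList ((PySem.List.pyGet? x 0).getD ' ' :: '.' ::
          PySem.Chars.join [] ((x.tail).map (fun c => [c]))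
          ++ 'e' :: PySem.Int.toChars ((x.length : Int) - 1)))
    =
    (let st := x.foldl scientificStep ([], none)
     let exp := st.2.getD ((st.1.length : Int) - 1)
     String.ofList ((PySem.List.pyGet? st.1 0).getD ' ' :: '.' ::
       PySem.Chars.join [] ((st.1.tail).map (fun c => [c])) ++ 'e' :: PySem.Int.toChars exp)) := by
  by_cases hd : '.' ∈ x
  · obtain ⟨k, hk⟩ := Option.isSome_iff_exists.mp ((PySem.List.index?_isSome_iff x '.').mpr hd)
    obtain ⟨pre, suf, hx, hlen, hpre⟩ := (PySem.List.index?_eq_some_iff x '.' k).mp hk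
    subst hx
    rw [if_pos hd, PySem.List.remove?_eq_some_erase _ '.' hd, hk, fold_dot pre suf hpre]
    simp [List.erase_append_right _ (by simpa using hpre), List.erase_cons_head, hlen]
  · rw [if_neg hd, fold_nodot x [] hd]
    simp

-- ===== VERDICT (by name: the statement is the Claim_ definition above) =====
theorem scientific_spec : Claim_equal_scientific := by
  intro binarynum _ hpre
  show scientific binarynum = scientific_alt binarynum
  unfold Pre_scientific at hpre
  cases hl : binarynum.toList with
  | nil =>
    rw [hl] at hpre
    simp at hpre
  | cons c t =>
    unfold scientific scientific_alt
    simp only [hl, PySem.List.foldl_append_singleton_eq_self, List.nil_append,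
      PySem.List.slice_from_one]
    by_cases hc : c = '-'
    · subst hc
      rw [if_pos (show PySem.List.pyGet? ('-' :: t) 0 = some '-' from by
            simp [PySem.List.pyGet?, PySem.List.pyIdx?])]
      rw [if_pos (show PySem.List.slice ('-' :: t) none (some 1) = ['-'] from by
            rw [PySem.List.slice_to _ (by omega)]; rfl)]
      rw [show PySem.List.slice ('-' :: t) (some 1) none = t from PySem.List.slice_from_one _]
      rw [if_congr (show (('.' : Char) ∈ '-' :: t) ↔ (('.' : Char) ∈ t) from by simp) rfl rfl]
      exact core t
    · rw [if_neg (show ¬ PySem.List.pyGet? (c :: t) 0 = some '-' from by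
            simp [PySem.List.pyGet?, PySem.List.pyIdx?, hc])]
      rw [if_neg (show ¬ PySem.List.slice (c :: t) none (some 1) = ['-'] from by
            rw [PySem.List.slice_to _ (by omega)]; simp [hc])]
      rw [show PySem.List.slice (c :: t) (some 0) none = c :: t from by
            rw [PySem.List.slice_from _ (by omega)]; rfl]
      exact core (c :: t)
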